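-- pv_equiv track=rewrite | github.com/rust17/deep-research | src/deep_research/tools/_base.py | normalize_and_limit
-- ===== SOURCE A (Python) =====
-- from typing import Iterator, Optional
--
-- MAX_LINE_LENGTH = 2000
--
-- MAX_LINES = 1000
--
-- MAX_TOTAL_CHARS = 3000
--
-- MIN_JOIN_LENGTH = 15
--
-- def normalize_and_limit(text_iterator: Iterator[str]) -> str:
--     total_chars = 0
--     lines_count = 0
--     result_parts = []
--     pending_buffer = ""
--
--     for chunk in text_iterator:
--         if not chunk:
--             continue
--         for line in chunk.splitlines():
--             line = line.strip()
--             if not line: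
--                 continue
--
--             if pending_buffer:
--                 line = f"{pending_buffer} {line}"
--                 pending_buffer = ""
--
--             if len(line) <= MIN_JOIN_LENGTH:
--                 pending_buffer = line
--                 continue
--
--             if lines_count >= MAX_LINES:
--                 return "\n".join(result_parts)
--
--             if len(line) > MAX_LINE_LENGTH:
--                 line = line[:MAX_LINE_LENGTH] + "..."
--
--             if total_chars + len(line) > MAX_TOTAL_CHARS:
--                 remaining = MAX_TOTAL_CHARS - total_chars
--                 if remaining > 0:
--                     result_parts.append(line[:remaining])
--                 return "\n".join(result_parts)
--
--             result_parts.append(line)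
--             total_chars += len(line)
--             lines_count += 1
--
--     if pending_buffer and lines_count < MAX_LINES:
--         if total_chars + len(pending_buffer) <= MAX_TOTAL_CHARS:
--             result_parts.append(pending_buffer)
--
--     return "\n".join(result_parts)
-- ===== SOURCE B (Python) =====
-- MAX_LINE_LENGTH = 2000
-- MAX_LINES = 1000
-- MAX_TOTAL_CHARS = 3000
-- MIN_JOIN_LENGTH = 15
--
--
-- def normalize_and_limit(text_iterator):
--     # Pass 1: normalize and merge.  Build the full list of candidate lines
--     # (stripped, non-empty, short lines glued onto the next one), plus the
--     # final unflushed short-line buffer.  No limits are applied here.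
--     cands = []
--     pending = ""
--     for chunk in text_iterator:
--         for raw in chunk.splitlines():
--             line = raw.strip()
--             if not line:
--                 continue
--             if pending:
--                 line = pending + " " + line
--                 pending = ""
--             if len(line) <= MIN_JOIN_LENGTH:
--                 pending = line
--             else:
--                 cands.append(line)
--
--     # Pass 2: truncate over-long candidate lines.
--     ts = [l[:MAX_LINE_LENGTH] + "..." if len(l) > MAX_LINE_LENGTH else l
--           for l in cands]
--
--     # Pass 3: arithmetic cutoff.  Find k, the number of whole lines that fit
--     # under both the line budget and the character budget, then decide what
--     # (if anything) follows the k kept lines.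
--     n = min(len(ts), MAX_LINES)
--     total = 0
--     k = 0
--     while k < n and total + len(ts[k]) <= MAX_TOTAL_CHARS:
--         total += len(ts[k])
--         k += 1
--
--     parts = ts[:k]
--     if k < len(ts) and k < MAX_LINES:
--         # stopped on the character budget: keep a partial slice of line k
--         remaining = MAX_TOTAL_CHARS - total
--         if remaining > 0:
--             parts.append(ts[k][:remaining])
--     elif k == len(ts):
--         # every candidate fit: the leftover short buffer may ride along whole
--         if pending and k < MAX_LINES and total + len(pending) <= MAX_TOTAL_CHARS:
--             parts.append(pending)
--     return "\n".join(parts)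
-- ===== Notes on version B (the rewrite author's own statement) =====
-- stated objective: alternative
-- what changed: A's single interleaved loop (merging, truncating and budget-checking line by line with early returns) is replaced by three staged passes: build the full merged candidate list, truncate long lines with a map, then compute the cutoff index k arithmetically over line lengths and assemble the result from ts[:k] plus the partial slice or pending tail.
import Mathlib
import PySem

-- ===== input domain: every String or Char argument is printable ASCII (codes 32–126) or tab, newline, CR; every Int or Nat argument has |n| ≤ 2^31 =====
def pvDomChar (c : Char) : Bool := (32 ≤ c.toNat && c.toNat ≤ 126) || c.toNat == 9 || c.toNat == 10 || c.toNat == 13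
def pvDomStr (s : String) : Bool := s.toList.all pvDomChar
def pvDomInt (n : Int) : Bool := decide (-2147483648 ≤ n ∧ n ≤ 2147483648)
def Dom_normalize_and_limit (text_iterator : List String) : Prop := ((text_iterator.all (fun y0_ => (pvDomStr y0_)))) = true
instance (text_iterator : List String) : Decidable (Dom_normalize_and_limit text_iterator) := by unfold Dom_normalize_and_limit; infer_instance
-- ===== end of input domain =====

-- B replaces A's single interleaved loop (limits enforced while merging, with early
-- returns) by three staged passes: merge all candidate lines, truncate long ones,
-- then find the cutoff index arithmetically (objective: alternative, same cost).
-- Return values only; neither program mutates its input.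

-- ===== PORT A =====
-- inner `for line in chunk.splitlines()` loop; Sum.inl = early `return`,
-- Sum.inr = fall through with the updated (total_chars, lines_count, result_parts, pending_buffer)
def pvA_lines : List String → Int → Nat → List String → String →
    String ⊕ (Int × Nat × List String × String)
  | [], t, c, parts, p => Sum.inr (t, c, parts, p)
  | l :: rest, t, c, parts, p =>
    let line := PySem.Str.strip l
    if line = "" then pvA_lines rest t c parts p
    else
      let line2 := if p ≠ "" then p ++ " " ++ line else line
      if PySem.Str.len line2 ≤ 15 then pvA_lines rest t c parts line2
      else if c ≥ 1000 then Sum.inl (PySem.Str.join "\n" parts)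
      else
        let line3 := if PySem.Str.len line2 > 2000 then
            PySem.Str.slice line2 none (some (2000 : Int)) ++ "..." else line2
        if t + PySem.Str.len line3 > 3000 then
          Sum.inl (PySem.Str.join "\n"
            (if 3000 - t > 0 then
              parts ++ [PySem.Str.slice line3 none (some (3000 - t))] else parts))
        else pvA_lines rest (t + PySem.Str.len line3) (c + 1) (parts ++ [line3]) ""

-- outer `for chunk in text_iterator` loop
def pvA_chunks : List String → Int → Nat → List String → String →
    String ⊕ (Int × Nat × List String × String)
  | [], t, c, parts, p => Sum.inr (t, c, parts, p)
  | ch :: rest, t, c, parts, p =>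
    if ch = "" then pvA_chunks rest t c parts p
    else
      match pvA_lines (PySem.Str.splitlines ch) t c parts p with
      | Sum.inl s => Sum.inl s
      | Sum.inr (t', c', parts', p') => pvA_chunks rest t' c' parts' p'

def normalize_and_limit (text_iterator : List String) : String :=
  match pvA_chunks text_iterator 0 0 [] "" with
  | Sum.inl s => s
  | Sum.inr (t, c, parts, p) =>
    PySem.Str.join "\n"
      (if p ≠ "" then
        (if c < 1000 then
          (if t + PySem.Str.len p ≤ 3000 then parts ++ [p] else parts) else parts)
       else parts)

-- ===== PORT B =====
-- pass 1, inner loop over one chunk's lines: state (cands, pending)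
def pvB_mlines : List String → List String → String → List String × String
  | [], cands, p => (cands, p)
  | raw :: rest, cands, p =>
    let line := PySem.Str.strip raw
    if line = "" then pvB_mlines rest cands p
    else
      let line2 := if p ≠ "" then p ++ " " ++ line else line
      if PySem.Str.len line2 ≤ 15 then pvB_mlines rest cands line2
      else pvB_mlines rest (cands ++ [line2]) ""

-- pass 1, outer loop over chunks
def pvB_merge : List String → List String → String → List String × String
  | [], cands, p => (cands, p)
  | ch :: rest, cands, p =>
    let (cands', p') := pvB_mlines (PySem.Str.splitlines ch) cands p
    pvB_merge rest cands' p'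

-- pass 2: truncate one over-long candidate line
def pvB_trunc (l : String) : String :=
  if PySem.Str.len l > 2000 then
    PySem.Str.slice l none (some (2000 : Int)) ++ "..." else l

-- pass 3: the `while k < n and total + len(ts[k]) <= MAX_TOTAL_CHARS` loop;
-- returns (k, total) counted from the front of the list
def pvB_cut : List String → Nat → Int → Nat × Int
  | [], _, t => (0, t)
  | _ :: _, 0, t => (0, t)
  | l :: rest, n + 1, t =>
    if t + PySem.Str.len l ≤ 3000 then
      let (k, t') := pvB_cut rest n (t + PySem.Str.len l)
      (k + 1, t')
    else (0, t)

def normalize_and_limit_alt (text_iterator : List String) : String :=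
  let (cands, pending) := pvB_merge text_iterator [] ""
  let ts := cands.map pvB_trunc
  let n := min ts.length 1000
  let (k, total) := pvB_cut ts n 0
  let parts := ts.take k
  let parts :=
    if k < ts.length ∧ k < 1000 then
      (if 3000 - total > 0 then
        parts ++ [PySem.Str.slice (ts.getD k "") none (some (3000 - total))]
       else parts)
    else if k = ts.length then
      (if pending ≠ "" ∧ k < 1000 ∧ total + PySem.Str.len pending ≤ 3000 then
        parts ++ [pending] else parts)
    else parts
  PySem.Str.join "\n" parts

-- ===== PRECONDITION & SPEC =====
def Spec_normalize_and_limit (text_iterator : List String) (out : String) : Prop := out = normalize_and_limit_alt text_iterator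
instance (text_iterator : List String) (out : String) : Decidable (Spec_normalize_and_limit text_iterator out) := by unfold Spec_normalize_and_limit; infer_instance

-- ===== CLAIM (what is proved, stated in full; the proofs are below) =====
def Claim_equal_normalize_and_limit : Prop := ∀ (text_iterator : List String), Dom_normalize_and_limit text_iterator → Spec_normalize_and_limit text_iterator (normalize_and_limit text_iterator)

-- ===== LEMMAS AND PROOFS =====

-- proof-only reference: cons-style merge (no accumulator)
def pvMl : List String → String → List String × String
  | [], p => ([], p)
  | raw :: rest, p =>
    let line := PySem.Str.strip raw
    if line = "" then pvMl rest p
    else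
      let line2 := if p ≠ "" then p ++ " " ++ line else line
      if PySem.Str.len line2 ≤ 15 then pvMl rest line2
      else
        let r := pvMl rest ""
        (line2 :: r.1, r.2)

theorem pvMl_append (xs ys : List String) (p : String) :
    pvMl (xs ++ ys) p = ((pvMl xs p).1 ++ (pvMl ys (pvMl xs p).2).1, (pvMl ys (pvMl xs p).2).2) := by
  induction xs generalizing p with
  | nil => simp [pvMl]
  | cons l rest ih => simp only [List.cons_append, pvMl]; split_ifs <;> simp [ih]

theorem pvB_mlines_eq (lines : List String) (cands : List String) (p : String) :
    pvB_mlines lines cands p = (cands ++ (pvMl lines p).1, (pvMl lines p).2) := by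
  induction lines generalizing cands p with
  | nil => simp [pvB_mlines, pvMl]
  | cons l rest ih => simp only [pvB_mlines, pvMl]; split_ifs <;> simp [ih]

theorem pvB_merge_eq (chunks : List String) (cands : List String) (p : String) :
    pvB_merge chunks cands p =
      (cands ++ (pvMl (chunks.flatMap PySem.Str.splitlines) p).1,
       (pvMl (chunks.flatMap PySem.Str.splitlines) p).2) := by
  induction chunks generalizing cands p with
  | nil => simp [pvB_merge, pvMl]
  | cons ch rest ih =>
    simp only [pvB_merge, List.flatMap_cons, pvMl_append, pvB_mlines_eq, ih]
    simp

-- proof-only reference: B's pass 3 generalized over the running total t and the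
-- remaining line budget b (the port instantiates t = 0, b = 1000)
def pvS (ts : List String) (pending : String) (t : Int) (b : Nat) : List String :=
  let n := min ts.length b
  let r := pvB_cut ts n t
  let parts := ts.take r.1
  if r.1 < ts.length ∧ r.1 < b then
    (if 3000 - r.2 > 0 then
      parts ++ [PySem.Str.slice (ts.getD r.1 "") none (some (3000 - r.2))]
     else parts)
  else if r.1 = ts.length then
    (if pending ≠ "" ∧ r.1 < b ∧ r.2 + PySem.Str.len pending ≤ 3000 then
      parts ++ [pending] else parts)
  else parts

theorem pvB_cut_zero (ts : List String) (t : Int) : pvB_cut ts 0 t = (0, t) := by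
  cases ts <;> simp [pvB_cut]

theorem pvS_cons (l : String) (ts : List String) (pending : String) (t : Int) (b : Nat)
    (hb : 1 ≤ b) (hfit : t + PySem.Str.len l ≤ 3000) :
    pvS (l :: ts) pending t b = l :: pvS ts pending (t + PySem.Str.len l) (b - 1) := by
  obtain ⟨b', rfl⟩ : ∃ b', b = b' + 1 := ⟨b - 1, by omega⟩
  simp only [pvS, Nat.add_sub_cancel]
  rw [show min (l :: ts).length (b' + 1) = min ts.length b' + 1 by
    simp only [List.length_cons]; omega]
  rcases hr : pvB_cut ts (min ts.length b') (t + PySem.Str.len l) with ⟨k, t'⟩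
  simp only [pvB_cut, if_pos hfit, hr]
  simp only [List.take_succ_cons, List.length_cons, List.getD_cons_succ]
  rw [if_congr (show (k + 1 < ts.length + 1 ∧ k + 1 < b' + 1) ↔ (k < ts.length ∧ k < b')
      by omega) rfl rfl]
  rw [if_congr (show (k + 1 = ts.length + 1) ↔ (k = ts.length) by omega)
      (if_congr (show (pending ≠ "" ∧ k + 1 < b' + 1 ∧ t' + PySem.Str.len pending ≤ 3000)
          ↔ (pending ≠ "" ∧ k < b' ∧ t' + PySem.Str.len pending ≤ 3000) by
        constructor <;> (rintro ⟨a, c2, d⟩; exact ⟨a, by omega, d⟩)) rfl rfl) rfl]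
  split_ifs <;> simp

-- B's consumer-view: A's remaining line loop + trailing pending check equals
-- parts ++ pvS over the merged/truncated remainder, from any shared state
theorem pv_main (lines : List String) (t : Int) (c : Nat) (parts : List String) (p : String)
    (hc : c ≤ 1000) :
    (match pvA_lines lines t c parts p with
     | Sum.inl s => s
     | Sum.inr (t', c', parts', p') =>
       PySem.Str.join "\n"
         (if p' ≠ "" then
           (if c' < 1000 then
             (if t' + PySem.Str.len p' ≤ 3000 then parts' ++ [p'] else parts') else parts')
          else parts'))
    = PySem.Str.join "\n"
        (parts ++ pvS ((pvMl lines p).1.map pvB_trunc) (pvMl lines p).2 t (1000 - c)) := by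
  induction lines generalizing t c parts p with
  | nil =>
    simp only [pvA_lines, pvMl, List.map_nil, pvS, List.length_nil, Nat.zero_min,
      pvB_cut_zero, List.take_nil]
    by_cases hp : p = ""
    · simp [hp]
    · by_cases hc1 : c < 1000
      · simp [hp, hc1, show 0 < 1000 - c by omega]
        split_ifs <;> simp
      · simp [hp, hc1, show ¬ 0 < 1000 - c by omega]
  | cons l rest ih =>
    simp only [pvA_lines, pvMl]
    by_cases h1 : PySem.Str.strip l = ""
    · simp only [if_pos h1]; exact ih t c parts p hc
    · simp only [if_neg h1]
      set line2 := (if p ≠ "" then p ++ " " ++ PySem.Str.strip l else PySem.Str.strip l) with hline2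
      by_cases h2 : PySem.Str.len line2 ≤ 15
      · simp only [if_pos h2]; exact ih _ _ _ _ hc
      · simp only [if_neg h2]
        set line3 := (if PySem.Str.len line2 > 2000 then
            PySem.Str.slice line2 none (some (2000 : Int)) ++ "..." else line2) with hline3
        have htr : pvB_trunc line2 = line3 := by simp [pvB_trunc, hline3]
        by_cases h3 : c ≥ 1000
        · -- A early-returns on the line budget; on B's side the budget 1000 - c = 0
          have hb0 : 1000 - c = 0 := by omega
          simp only [if_pos h3, hb0, pvS, List.map_cons, htr, Nat.min_zero, pvB_cut_zero,
            List.take_zero, List.length_cons]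
          simp
        · simp only [if_neg h3]
          have hb : 1 ≤ 1000 - c := by omega
          by_cases h4 : t + PySem.Str.len line3 > 3000
          · -- A early-returns on the char budget; B's cut stops at k = 0
            rw [if_pos h4]
            obtain ⟨b', hb'⟩ : ∃ b', 1000 - c = b' + 1 := ⟨1000 - c - 1, by omega⟩
            simp only [pvS, List.map_cons, htr, hb']
            rw [show min (line3 :: (pvMl rest "").1.map pvB_trunc).length (b' + 1)
                = min ((pvMl rest "").1.map pvB_trunc).length b' + 1 by
              simp only [List.length_cons]; omega]
            simp only [pvB_cut, if_neg (show ¬ t + PySem.Str.len line3 ≤ 3000 by omega)]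
            rw [if_pos (show (0 : Nat) < (line3 :: (pvMl rest "").1.map pvB_trunc).length ∧
                (0 : Nat) < b' + 1 from ⟨by simp, by omega⟩)]
            simp only [List.take_zero, List.getD_cons_zero]
            split_ifs <;> simp
          · rw [if_neg h4]
            rw [ih (t + PySem.Str.len line3) (c + 1) (parts ++ [line3]) "" (by omega)]
            rw [show (1000 : Nat) - (c + 1) = (1000 - c) - 1 by omega]
            rw [List.map_cons, htr,
              pvS_cons line3 _ _ t (1000 - c) hb (by omega)]
            simp

-- running A's inner loop on a concatenation = running it on the pieces in sequence
theorem pvA_lines_append (xs ys : List String) (t : Int) (c : Nat) (parts : List String) (p : String) :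
    pvA_lines (xs ++ ys) t c parts p =
      (match pvA_lines xs t c parts p with
       | Sum.inl s => Sum.inl s
       | Sum.inr (t', c', parts', p') => pvA_lines ys t' c' parts' p') := by
  induction xs generalizing t c parts p with
  | nil => simp [pvA_lines]
  | cons l rest ih =>
    simp only [List.cons_append, pvA_lines]
    split_ifs <;> simp [ih]

-- A's chunk loop is its line loop over the flattened line stream
theorem pvA_chunks_eq (chunks : List String) (t : Int) (c : Nat) (parts : List String) (p : String) :
    pvA_chunks chunks t c parts p =
      pvA_lines (chunks.flatMap PySem.Str.splitlines) t c parts p := by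
  induction chunks generalizing t c parts p with
  | nil => simp [pvA_chunks, pvA_lines]
  | cons ch rest ih =>
    simp only [pvA_chunks, List.flatMap_cons, pvA_lines_append]
    by_cases h : ch = ""
    · subst h
      have hsl : PySem.Str.splitlines "" = [] := rfl
      simp [hsl, pvA_lines, ih]
    · simp only [if_neg h]
      cases hres : pvA_lines (PySem.Str.splitlines ch) t c parts p with
      | inl s => rfl
      | inr st => obtain ⟨t', c', parts', p'⟩ := st; exact ih t' c' parts' p'

-- B's port is pvS on the merged/truncated candidates at t = 0, b = 1000
theorem pvB_alt_eq (ti : List String) :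
    normalize_and_limit_alt ti =
      PySem.Str.join "\n"
        (pvS ((pvMl (ti.flatMap PySem.Str.splitlines) "").1.map pvB_trunc)
             (pvMl (ti.flatMap PySem.Str.splitlines) "").2 0 1000) := by
  simp only [normalize_and_limit_alt, pvB_merge_eq, List.nil_append, pvS]

-- ===== VERDICT (by name: the statement is the Claim_ definition above) =====
theorem normalize_and_limit_spec : Claim_equal_normalize_and_limit := by
  intro ti _
  unfold Spec_normalize_and_limit normalize_and_limit
  rw [pvA_chunks_eq, pvB_alt_eq]
  exact pv_main (ti.flatMap PySem.Str.splitlines) 0 0 [] "" (by omega)
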